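-- pv_equiv track=rewrite | github.com/ganadipa/manajerial-candi | Helper.py | custom_chr
-- ===== SOURCE A (Python) =====
-- def custom_chr(k: int) -> str:
--     num = [48, 49, 50, 51, 52, 53, 54, 55, 56, 57,
--            65, 66, 67, 68, 69, 70, 71, 72, 73, 74, 75, 76, 77,
--            78, 79, 80, 81, 82, 83, 84, 85, 86, 87, 88, 89, 90,
--
--            97, 98, 99, 100, 101, 102, 103, 104, 105, 106, 107, 108, 109,
--            110, 111, 112, 113, 114, 115, 116, 117, 118, 119, 120, 121, 122]
--     returnVal = ['0','1','2','3','4','5','6','7','8', '9',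
--                     'A','B','C','D','E', 'F', 'G', 'H', 'I', 'J', 'K', 'L', 'M',
--                     'N','O','P','Q','R', 'S', 'T', 'U', 'V', 'W', 'X', 'Y', 'Z',
--
--                     'a','b','c','d','e', 'f', 'g', 'h', 'i', 'j', 'k', 'l', 'm',
--                     'n','o','p','q','r', 's', 't', 'u', 'v', 'w', 'x', 'y', 'z',
--                     ''
--                     ]
--
--     i = 0
--     while True:
--         if num[i] == k:
--             break
--         i += 1
--
--     return returnVal[i]
-- ===== SOURCE B (Python) =====
-- def custom_chr(k: int) -> str:
--     # k must be the ASCII code of a base62 character: digit, upper, or lower.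
--     if 48 <= k <= 57 or 65 <= k <= 90 or 97 <= k <= 122:
--         return chr(k)
--     raise ValueError(f"not a base62 character code: {k}")
-- ===== Notes on version B (the rewrite author's own statement) =====
-- stated objective: simpler
-- what changed: Replaces the linear scan of a 62-entry parallel-array table with a direct range check on the three contiguous ASCII blocks and chr(k).
import Mathlib
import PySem

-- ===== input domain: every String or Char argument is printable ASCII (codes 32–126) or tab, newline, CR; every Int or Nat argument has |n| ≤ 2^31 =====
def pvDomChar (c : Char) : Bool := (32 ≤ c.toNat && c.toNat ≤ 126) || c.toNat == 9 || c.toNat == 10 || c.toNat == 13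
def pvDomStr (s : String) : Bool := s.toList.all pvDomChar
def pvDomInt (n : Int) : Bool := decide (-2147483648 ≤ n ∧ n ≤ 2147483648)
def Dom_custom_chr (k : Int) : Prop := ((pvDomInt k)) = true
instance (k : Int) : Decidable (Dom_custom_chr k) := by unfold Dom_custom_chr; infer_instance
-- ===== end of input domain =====

-- ===== PORT A =====
-- B replaces A's linear scan of a 62-entry parallel-array table with a direct ASCII range check; both raise on invalid codes (excluded by Pre_).
def pvNum : List Int := [48, 49, 50, 51, 52, 53, 54, 55, 56, 57,
  65, 66, 67, 68, 69, 70, 71, 72, 73, 74, 75, 76, 77,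
  78, 79, 80, 81, 82, 83, 84, 85, 86, 87, 88, 89, 90,
  97, 98, 99, 100, 101, 102, 103, 104, 105, 106, 107, 108, 109,
  110, 111, 112, 113, 114, 115, 116, 117, 118, 119, 120, 121, 122]

def pvRet : List String := ["0","1","2","3","4","5","6","7","8","9",
  "A","B","C","D","E","F","G","H","I","J","K","L","M",
  "N","O","P","Q","R","S","T","U","V","W","X","Y","Z",
  "a","b","c","d","e","f","g","h","i","j","k","l","m",
  "n","o","p","q","r","s","t","u","v","w","x","y","z",
  ""]

-- the while-True scan: walk num and returnVal in parallel; running off the end is Python's IndexError (outside Pre_)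
def pvScanA (k : Int) : List Int → List String → String
  | n :: ns, r :: rs => if n = k then r else pvScanA k ns rs
  | _, _ => ""

def custom_chr (k : Int) : String := pvScanA k pvNum pvRet

-- ===== PORT B =====
def custom_chr_alt (k : Int) : String :=
  if (48 ≤ k ∧ k ≤ 57) ∨ (65 ≤ k ∧ k ≤ 90) ∨ (97 ≤ k ∧ k ≤ 122) then
    String.ofList [Char.ofNat k.toNat]
  else ""  -- Python B raises ValueError here (outside Pre_)

-- ===== PRECONDITION & SPEC =====
-- Pre_ excludes exactly the codes outside the three base62 ASCII blocks, on which A raises IndexError (the scan runs past the table) and B raises ValueError.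
def Pre_custom_chr (k : Int) : Prop :=
  (48 ≤ k ∧ k ≤ 57) ∨ (65 ≤ k ∧ k ≤ 90) ∨ (97 ≤ k ∧ k ≤ 122)
instance (k : Int) : Decidable (Pre_custom_chr k) := by unfold Pre_custom_chr; infer_instance
def pvWitness_custom_chr : Int := (65)

def Spec_custom_chr (k : Int) (out : String) : Prop := out = custom_chr_alt k
instance (k : Int) (out : String) : Decidable (Spec_custom_chr k out) := by unfold Spec_custom_chr; infer_instance

-- ===== CLAIM (what is proved, stated in full; the proofs are below) =====
def Claim_equal_custom_chr : Prop := ∀ (k : Int), Dom_custom_chr k → Pre_custom_chr k → Spec_custom_chr k (custom_chr k)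

-- ===== LEMMAS AND PROOFS =====

-- ===== VERDICT (by name: the statement is the Claim_ definition above) =====
theorem custom_chr_spec : Claim_equal_custom_chr := by
  intro k _ hp
  unfold Spec_custom_chr
  rcases hp with ⟨h1, h2⟩ | ⟨h1, h2⟩ | ⟨h1, h2⟩ <;> interval_cases k <;> decide
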